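-- pv_equiv track=rewrite | github.com/jarfa/connect4_tictactoe | utils.py | array_connected
-- ===== SOURCE A (Python) =====
-- def array_connected(row, num_to_connect):
--     assert len(row) >= num_to_connect
--     for i in range(1 + len(row) - num_to_connect):
--         subset = row[i:(i + num_to_connect)]
--         # check that they're all the same, but not empty
--         unique_vals = set(subset)
--         if len(unique_vals) == 1 and 0 not in unique_vals:
--             return True
--
--     return False
-- ===== SOURCE B (Python) =====
-- def array_connected(row, num_to_connect):
--     assert len(row) >= num_to_connect
--     count = 0
--     prev = None
--     for val in row:
--         count = count + 1 if val == prev else 1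
--         prev = val
--         if count == num_to_connect and val != 0:
--             return True
--     return False
-- ===== Notes on version B (the rewrite author's own statement) =====
-- stated objective: faster
-- what changed: Replaces the overlapping k-window re-slicing with a set() per window by a single left-to-right pass that maintains the current run length and fires when it reaches num_to_connect on a nonzero value.
-- intended difference: On num_to_connect < 0 where the negative stop index wraps (row[i:i+k] reads a constant nonzero stretch of length len(row)+k from the end) A accidentally returns True; B returns False, the intended answer since a malformed non-positive count should never report a win. — e.g. on array_connected([1, 1], -1): A returns true, B returns false
import Mathlib
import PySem

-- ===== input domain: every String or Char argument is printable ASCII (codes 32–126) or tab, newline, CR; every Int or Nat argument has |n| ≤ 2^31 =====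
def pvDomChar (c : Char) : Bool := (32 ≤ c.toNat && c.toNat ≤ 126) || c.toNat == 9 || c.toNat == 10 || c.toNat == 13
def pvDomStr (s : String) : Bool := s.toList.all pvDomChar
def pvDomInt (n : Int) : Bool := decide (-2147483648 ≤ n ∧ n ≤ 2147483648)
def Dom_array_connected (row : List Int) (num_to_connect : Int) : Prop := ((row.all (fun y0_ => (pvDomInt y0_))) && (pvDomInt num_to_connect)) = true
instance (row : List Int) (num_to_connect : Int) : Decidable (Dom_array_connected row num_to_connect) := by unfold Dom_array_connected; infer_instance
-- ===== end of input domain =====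

-- B replaces A's overlapping k-window re-slicing (a set() per window) by one pass that
-- maintains the current run length (O(n*k) -> O(n)); on num_to_connect < 0, A's negative-slice
-- wraparound can accidentally return True while B returns False (stated as D_ below).

-- ===== PORT A =====
def array_connected (row : List Int) (num_to_connect : Int) : Bool :=
  -- assert len(row) >= num_to_connect  → Pre_array_connected
  (PySem.List.pyRange 0 (1 + PySem.List.len row - num_to_connect) 1).any (fun i =>
    let subset := PySem.List.slice row (some i) (some (i + num_to_connect))
    let unique_vals := PySem.Set.ofList subset
    (PySem.Set.len unique_vals == 1) && !(PySem.Set.contains unique_vals 0))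

-- ===== PORT B =====
-- the for-loop of Source B: state (prev, count); early 'return True' = stop with true
def altGo (k : Int) : List Int → Option Int → Int → Bool
  | [], _, _ => false
  | val :: rest, prev, count =>
    let c := if prev == some val then count + 1 else 1
    if c == k && val != 0 then true else altGo k rest (some val) c

def array_connected_alt (row : List Int) (num_to_connect : Int) : Bool :=
  -- assert len(row) >= num_to_connect  → Pre_array_connected
  altGo num_to_connect row none 0

-- ===== PRECONDITION & SPEC =====
-- Pre_ is exactly A's assert: num_to_connect ≤ len(row) (AssertionError otherwise)
def Pre_array_connected (row : List Int) (num_to_connect : Int) : Prop :=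
  num_to_connect ≤ (row.length : Int)
instance (row : List Int) (num_to_connect : Int) : Decidable (Pre_array_connected row num_to_connect) := by
  unfold Pre_array_connected; infer_instance

def pvWitness_array_connected : List Int × Int := ([1, 2, 2, 0], 2)

-- On num_to_connect < 0 whose negative stop index wraps around (row[i:i+k] reads a constant
-- nonzero stretch of length len(row)+k from the end), A accidentally returns True; B returns
-- False, the intended answer for a malformed non-positive count, which should never report a win.
def D_array_connected (row : List Int) (num_to_connect : Int) : Prop :=
  num_to_connect < 0 ∧ 0 < (row.length : Int) + num_to_connect ∧
  ∃ i ∈ List.range (-num_to_connect).toNat, ∃ c ∈ row, c ≠ 0 ∧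
    (row.drop i).take ((row.length : Int) + num_to_connect).toNat =
      List.replicate ((row.length : Int) + num_to_connect).toNat c
instance (row : List Int) (num_to_connect : Int) : Decidable (D_array_connected row num_to_connect) := by
  unfold D_array_connected; infer_instance

def Spec_array_connected (row : List Int) (num_to_connect : Int) (out : Bool) : Prop := ¬ D_array_connected row num_to_connect → out = array_connected_alt row num_to_connect
instance (row : List Int) (num_to_connect : Int) (out : Bool) : Decidable (Spec_array_connected row num_to_connect out) := by unfold Spec_array_connected; infer_instance

def pvDiffWitness_array_connected : List Int × Int := ([1, 1], -1)
def pvDiffWitnessOut_array_connected : Bool × Bool := (true, false)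

-- ===== CLAIM (what is proved, stated in full; the proofs are below) =====
def Claim_unchanged_array_connected : Prop := ∀ (row : List Int) (num_to_connect : Int), Dom_array_connected row num_to_connect → Pre_array_connected row num_to_connect → Spec_array_connected row num_to_connect (array_connected row num_to_connect)
def Claim_changed_array_connected : Prop := Dom_array_connected (pvDiffWitness_array_connected.1) (pvDiffWitness_array_connected.2) ∧ Pre_array_connected (pvDiffWitness_array_connected.1) (pvDiffWitness_array_connected.2) ∧ D_array_connected (pvDiffWitness_array_connected.1) (pvDiffWitness_array_connected.2) ∧ array_connected (pvDiffWitness_array_connected.1) (pvDiffWitness_array_connected.2) = pvDiffWitnessOut_array_connected.1 ∧ array_connected_alt (pvDiffWitness_array_connected.1) (pvDiffWitness_array_connected.2) = pvDiffWitnessOut_array_connected.2 ∧ pvDiffWitnessOut_array_connected.1 ≠ pvDiffWitnessOut_array_connected.2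
def Claim_exact_array_connected : Prop := ∀ (row : List Int) (num_to_connect : Int), Dom_array_connected row num_to_connect → Pre_array_connected row num_to_connect → D_array_connected row num_to_connect → array_connected row num_to_connect ≠ array_connected_alt row num_to_connect

-- ===== LEMMAS AND PROOFS =====


-- common characterisation: a contiguous block of kn equal nonzero values occurs in l
def HasBlock (l : List Int) (kn : Nat) : Prop :=
  ∃ c : Int, c ≠ 0 ∧ List.replicate kn c <:+: l

theorem hasBlock_length {l : List Int} {kn : Nat} (h : HasBlock l kn) : kn ≤ l.length := by
  obtain ⟨c, _, hinf⟩ := h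
  simpa using hinf.length_le

theorem hasBlock_cons_zero {l : List Int} {kn : Nat} (hkn : 1 ≤ kn) :
    HasBlock (0 :: l) kn ↔ HasBlock l kn := by
  constructor
  · rintro ⟨c, hc, hinf⟩
    rcases List.infix_cons_iff.mp hinf with hpre | hinf'
    · exfalso
      have h0 : (List.replicate kn c)[0]'(by simp; omega) = (0 :: l)[0]'(by simp) :=
        hpre.getElem (by simp; omega)
      simp at h0; exact hc h0
    · exact ⟨c, hc, hinf'⟩
  · rintro ⟨c, hc, hinf⟩
    exact ⟨c, hc, List.infix_cons hinf⟩

-- a block cannot cross the boundary of a too-short run of p followed by a different value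
theorem hasBlock_replicate_cons {p val : Int} {l : List Int} {kn : Nat} :
    ∀ m : Nat, m < kn → p ≠ val →
    (HasBlock (List.replicate m p ++ val :: l) kn ↔ HasBlock (val :: l) kn) := by
  intro m
  induction m generalizing l with
  | zero => intro _ _; simp
  | succ m ih =>
    intro hm hne
    constructor
    · rintro ⟨c, hc, hinf⟩
      rw [List.replicate_succ, List.cons_append] at hinf
      rcases List.infix_cons_iff.mp hinf with hpre | hinf'
      · exfalso
        -- the prefix of length kn covers both position 0 (= p) and position m+1 (= val)
        have hlen : (List.replicate kn c).length = kn := by simp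
        have h0 : (List.replicate kn c)[0]'(by omega) =
            (p :: (List.replicate m p ++ val :: l))[0]'(by simp) :=
          hpre.getElem (by omega)
        have h1 : (List.replicate kn c)[m+1]'(by omega) =
            (p :: (List.replicate m p ++ val :: l))[m+1]'(by simp; try omega) :=
          hpre.getElem (by omega)
        simp at h0
        rw [List.getElem_cons_succ] at h1
        rw [List.getElem_append_right (by simp)] at h1
        simp at h1
        subst h0
        exact hne h1
      · exact (ih (by omega) hne).mp ⟨c, hc, hinf'⟩
    · rintro ⟨c, hc, hinf⟩
      refine ⟨c, hc, hinf.trans ?_⟩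
      exact ⟨List.replicate (m+1) p, [], by simp⟩

-- ===== A-side: array_connected = true ↔ HasBlock =====


-- set(s) is a nonzero singleton iff s is a nonempty constant nonzero list
theorem foldl_add_const (c : Int) : ∀ (s : List Int), (∀ x ∈ s, x = c) →
    List.foldl PySem.Set.add [c] s = [c] := by
  intro s
  induction s with
  | nil => intro _; rfl
  | cons a t ih =>
    intro h
    have ha : a = c := h a (by simp)
    have step : PySem.Set.add [c] a = [c] := by
      simp [PySem.Set.add, PySem.Set.contains, ha]
    rw [List.foldl_cons, step]
    exact ih (fun x hx => h x (by simp [hx]))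

theorem ofList_const (c : Int) (s : List Int) (hne : s ≠ []) (h : ∀ x ∈ s, x = c) :
    PySem.Set.ofList s = [c] := by
  cases s with
  | nil => exact absurd rfl hne
  | cons a t =>
    have ha : a = c := h a (by simp)
    have : PySem.Set.ofList (a :: t) = List.foldl PySem.Set.add [c] t := by
      rw [PySem.Set.ofList_eq_foldl, List.foldl_cons]
      congr 1
      simp [PySem.Set.add, PySem.Set.contains, ha]
    rw [this]
    exact foldl_add_const c t (fun x hx => h x (by simp [hx]))

theorem set_singleton_nonzero (s : List Int) :
    ((PySem.Set.len (PySem.Set.ofList s) == 1) &&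
      !(PySem.Set.contains (PySem.Set.ofList s) 0)) = true ↔
    ∃ c : Int, c ≠ 0 ∧ s ≠ [] ∧ ∀ x ∈ s, x = c := by
  rw [Bool.and_eq_true, beq_iff_eq, Bool.not_eq_true', Bool.eq_false_iff]
  constructor
  · rintro ⟨hlen, h0⟩
    have hlen' : (PySem.Set.ofList s).length = 1 := by
      simpa [PySem.Set.len, PySem.List.len] using hlen
    obtain ⟨c, hc⟩ := List.length_eq_one_iff.mp hlen'
    have hmem : ∀ x : Int, x ∈ s → x = c := by
      intro x hx
      have := (PySem.Set.mem_ofList s x).mpr hx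
      rw [hc] at this; simpa using this
    have hc0 : c ≠ 0 := by
      intro h
      apply h0
      have : (0 : Int) ∈ PySem.Set.ofList s := by rw [hc, h]; simp
      simpa [PySem.Set.contains] using this
    have hne : s ≠ [] := by
      intro h
      rw [h] at hc
      simp [PySem.Set.ofList] at hc
    exact ⟨c, hc0, hne, hmem⟩
  · rintro ⟨c, hc0, hne, hmem⟩
    have hof : PySem.Set.ofList s = [c] := ofList_const c s hne hmem
    constructor
    · simp [PySem.Set.len, hof]
    · intro hcon
      have : (0 : Int) ∈ s := by
        have : (0 : Int) ∈ PySem.Set.ofList s := by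
          simpa [PySem.Set.contains] using hcon
        exact (PySem.Set.mem_ofList s 0).mp this
      exact hc0 ((hmem 0 this).symm)

-- ===== A-side characterisation =====
theorem A_true_iff (row : List Int) (k : Int) (hk : 1 ≤ k) (hlen : k ≤ (row.length : Int)) :
    array_connected row k = true ↔ HasBlock row k.toNat := by
  unfold array_connected
  rw [List.any_eq_true]
  constructor
  · rintro ⟨i, hi, hp⟩
    rw [PySem.List.mem_pyRange_one] at hi
    simp only [PySem.List.len] at hi
    obtain ⟨hi0, hiu⟩ := hi
    rw [set_singleton_nonzero] at hp
    obtain ⟨c, hc0, hne, hmem⟩ := hp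
    have hslice : PySem.List.slice row (some i) (some (i + k)) =
        List.take k.toNat (List.drop i.toNat row) := by
      rw [PySem.List.slice_toNat row hi0 (by omega)]
      congr 1
      omega
    rw [hslice] at hne hmem
    refine ⟨c, hc0, ?_⟩
    have hlen2 : (List.take k.toNat (List.drop i.toNat row)).length = k.toNat := by
      simp only [List.length_take, List.length_drop]
      omega
    have hrep : List.take k.toNat (List.drop i.toNat row) = List.replicate k.toNat c := by
      rw [List.eq_replicate_iff]
      exact ⟨hlen2, hmem⟩
    refine ⟨List.take i.toNat row, List.drop k.toNat (List.drop i.toNat row), ?_⟩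
    rw [← hrep, List.append_assoc, List.take_append_drop, List.take_append_drop]
  · rintro ⟨c, hc0, s, t, heq⟩
    have hrowlen : row.length = s.length + k.toNat + t.length := by
      rw [← heq]; simp; omega
    refine ⟨(s.length : Int), ?_, ?_⟩
    · rw [PySem.List.mem_pyRange_one]
      simp only [PySem.List.len]
      exact ⟨by positivity, by omega⟩
    · rw [set_singleton_nonzero]
      have hslice : PySem.List.slice row (some (s.length : Int)) (some ((s.length : Int) + k)) =
          List.take k.toNat (List.drop s.length row) := by
        rw [PySem.List.slice_toNat row (by positivity) (by omega)]
        congr 1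
        omega
      have hdrop : List.drop s.length row = List.replicate k.toNat c ++ t := by
        rw [← heq, List.append_assoc, List.drop_left]
      have htake : List.take k.toNat (List.drop s.length row) = List.replicate k.toNat c := by
        rw [hdrop, List.take_left' (by simp)]
      rw [hslice, htake]
      refine ⟨c, hc0, ?_, ?_⟩
      · simp only [ne_eq, List.replicate_eq_nil_iff]
        omega
      · intro x hx
        exact List.eq_of_mem_replicate hx

-- ===== B-side characterisation =====
-- the run of the processed prefix that the state (prev, count) stands for
def ctxOf : Option Int → Int → List Int
  | none, _ => []
  | some p, cnt => if p = 0 then [] else List.replicate cnt.toNat p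

theorem altGo_iff (k : Int) (hk : 1 ≤ k) :
    ∀ (l : List Int) (prev : Option Int) (cnt : Int),
    (∀ p, prev = some p → p ≠ 0 → 1 ≤ cnt ∧ cnt < k) →
    (altGo k l prev cnt = true ↔ HasBlock (ctxOf prev cnt ++ l) k.toNat) := by
  intro l
  induction l with
  | nil =>
    intro prev cnt hinv
    simp only [altGo, List.append_nil]
    constructor
    · intro h; exact absurd h (by simp)
    · intro h
      exfalso
      have hl := hasBlock_length h
      match prev with
      | none => simp [ctxOf] at hl; omega
      | some p =>
        by_cases hp : p = 0
        · simp [ctxOf, hp] at hl; omega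
        · obtain ⟨h1, h2⟩ := hinv p rfl hp
          simp [ctxOf, hp] at hl
          omega
  | cons val rest ih =>
    intro prev cnt hinv
    have hkn : 1 ≤ k.toNat := by omega
    match prev with
    | none =>
      simp only [altGo, show ((none : Option Int) == some val) = false from rfl,
        Bool.false_eq_true, if_false, ctxOf, List.nil_append]
      by_cases htrig : (1 : Int) = k ∧ val ≠ 0
      · obtain ⟨hk1, hv⟩ := htrig
        rw [if_pos (by simp [← hk1, hv])]
        simp only [true_iff]
        exact ⟨val, hv, by
          have : List.replicate k.toNat val = [val] := by
            rw [show k.toNat = 1 by omega]; rfl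
          rw [this]
          exact ⟨[], rest, rfl⟩⟩
      · rw [if_neg (by
          intro hcon
          rw [Bool.and_eq_true, beq_iff_eq, bne_iff_ne] at hcon
          exact htrig ⟨hcon.1, hcon.2⟩)]
        rw [ih (some val) 1 (by
          intro p hp hp0
          injection hp with hp; subst hp
          refine ⟨le_refl 1, ?_⟩
          rcases lt_or_eq_of_le hk with h | h
          · exact h
          · exact absurd ⟨h, hp0⟩ htrig)]
        by_cases hv : val = 0
        · subst hv
          simp only [ctxOf]
          exact (hasBlock_cons_zero hkn).symm
        · simp only [ctxOf, if_neg hv]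
          rw [show Int.toNat 1 = 1 from rfl]
          rfl
    | some p =>
      by_cases hpv : p = val
      · subst hpv
        simp only [altGo, show (some p == some p) = true by simp, if_true]
        by_cases hv : p = 0
        · subst hv
          rw [if_neg (by simp)]
          rw [ih (some 0) (cnt + 1) (by intro q hq hq0; injection hq with hq; omega)]
          simp only [ctxOf]
          exact ((hasBlock_cons_zero hkn).symm)
        · obtain ⟨hc1, hc2⟩ := hinv p rfl hv
          simp only [ctxOf, if_neg hv]
          by_cases htrig : cnt + 1 = k
          · rw [if_pos (by simp [htrig, hv])]
            simp only [true_iff]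
            refine ⟨p, hv, ?_⟩
            have : List.replicate cnt.toNat p ++ p :: rest =
                List.replicate k.toNat p ++ rest := by
              rw [show k.toNat = cnt.toNat + 1 by omega, List.replicate_succ',
                List.append_assoc]
              rfl
            rw [this]
            exact ⟨[], rest, rfl⟩
          · rw [if_neg (by
              intro hcon
              rw [Bool.and_eq_true, beq_iff_eq] at hcon
              exact htrig hcon.1)]
            rw [ih (some p) (cnt + 1) (by
              intro q hq hq0; injection hq with hq; subst hq
              constructor
              · omega
              · omega)]
            simp only [ctxOf, if_neg hv]
            have : List.replicate (cnt + 1).toNat p ++ rest =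
                List.replicate cnt.toNat p ++ p :: rest := by
              rw [show (cnt + 1).toNat = cnt.toNat + 1 by omega, List.replicate_succ',
                List.append_assoc]
              rfl
            rw [this]
      · simp only [altGo, show (some p == some val) = false by simp [hpv],
          Bool.false_eq_true, if_false]
        have hctx_red : HasBlock (ctxOf (some p) cnt ++ val :: rest) k.toNat ↔
            HasBlock (val :: rest) k.toNat := by
          by_cases hp0 : p = 0
          · simp [ctxOf, hp0]
          · obtain ⟨hc1, hc2⟩ := hinv p rfl hp0
            simp only [ctxOf, if_neg hp0]
            exact hasBlock_replicate_cons cnt.toNat (by omega) hpv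
        by_cases htrig : (1 : Int) = k ∧ val ≠ 0
        · obtain ⟨hk1, hvv⟩ := htrig
          rw [if_pos (by simp [← hk1, hvv])]
          simp only [true_iff]
          rw [hctx_red]
          exact ⟨val, hvv, by
            have : List.replicate k.toNat val = [val] := by
              rw [show k.toNat = 1 by omega]; rfl
            rw [this]
            exact ⟨[], rest, rfl⟩⟩
        · rw [if_neg (by
            intro hcon
            rw [Bool.and_eq_true, beq_iff_eq, bne_iff_ne] at hcon
            exact htrig ⟨hcon.1, hcon.2⟩)]
          rw [ih (some val) 1 (by
            intro q hq hq0
            injection hq with hq; subst hq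
            refine ⟨le_refl 1, ?_⟩
            rcases lt_or_eq_of_le hk with h | h
            · exact h
            · exact absurd ⟨h, hq0⟩ htrig)]
          rw [hctx_red]
          by_cases hvv : val = 0
          · subst hvv
            simp only [ctxOf]
            exact (hasBlock_cons_zero hkn).symm
          · simp only [ctxOf, if_neg hvv]
            rw [show Int.toNat 1 = 1 from rfl]
            rfl

theorem B_true_iff (row : List Int) (k : Int) (hk : 1 ≤ k) :
    array_connected_alt row k = true ↔ HasBlock row k.toNat := by
  unfold array_connected_alt
  rw [altGo_iff k hk row none 0 (by intro p hp; cases hp)]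
  rfl


-- B never fires for a non-positive count: the run counter stays ≥ 1
theorem altGo_nonpos (k : Int) (hk : k ≤ 0) :
    ∀ (l : List Int) (prev : Option Int) (cnt : Int), 0 ≤ cnt →
    altGo k l prev cnt = false := by
  intro l
  induction l with
  | nil => intro _ _ _; rfl
  | cons val rest ih =>
    intro prev cnt hcnt
    simp only [altGo]
    rw [if_neg (by
      intro hcon
      rw [Bool.and_eq_true, beq_iff_eq] at hcon
      split at hcon <;> omega)]
    split <;> exact ih _ _ (by omega)

-- a slice with a negative length argument, for a nonnegative start
theorem slice_neg_char (row : List Int) (i k : Int) (hi : 0 ≤ i) (hk : k < 0) :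
    PySem.List.slice row (some i) (some (i + k)) =
      if i + k < 0 ∧ 0 < (row.length : Int) + k then
        List.take ((row.length : Int) + k).toNat (List.drop i.toNat row)
      else [] := by
  simp only [PySem.List.slice, PySem.List.clampIdx]
  split_ifs with h1 h2 h3 h4 h5 h6 h7 <;>
    first
    | (exfalso; omega)
    | (apply List.eq_nil_of_length_eq_zero
       simp only [List.length_take, List.length_drop]
       omega)
    | (have ha : min i.toNat row.length = i.toNat := by omega
       have hb : ((row.length : Int) + i + k).toNat - min i.toNat row.length =
           ((row.length : Int) + k).toNat := by omega
       rw [ha] at *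
       congr 1
       omega)

-- A on a negative count: true exactly on the wrapped-window condition of D_
theorem A_neg_iff (row : List Int) (k : Int) (hk : k < 0) :
    array_connected row k = true ↔
      (0 < (row.length : Int) + k ∧
        ∃ i ∈ List.range (-k).toNat, ∃ c ∈ row, c ≠ 0 ∧
          (row.drop i).take ((row.length : Int) + k).toNat =
            List.replicate ((row.length : Int) + k).toNat c) := by
  unfold array_connected
  rw [List.any_eq_true]
  constructor
  · rintro ⟨i, hi, hp⟩
    rw [PySem.List.mem_pyRange_one] at hi
    simp only [PySem.List.len] at hi
    obtain ⟨hi0, hiu⟩ := hi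
    rw [set_singleton_nonzero] at hp
    obtain ⟨c, hc0, hne, hmem⟩ := hp
    rw [slice_neg_char row i k hi0 hk] at hne hmem
    by_cases hcond : i + k < 0 ∧ 0 < (row.length : Int) + k
    · rw [if_pos hcond] at hne hmem
      obtain ⟨hik, hpos⟩ := hcond
      refine ⟨hpos, i.toNat, ?_, c, ?_, hc0, ?_⟩
      · rw [List.mem_range]; omega
      · have hcw : c ∈ List.take ((row.length : Int) + k).toNat (List.drop i.toNat row) := by
          cases hw : List.take ((row.length : Int) + k).toNat (List.drop i.toNat row) with
          | nil => exact absurd hw hne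
          | cons a t =>
            have ha : a = c := hmem a (by rw [hw]; exact List.mem_cons_self)
            rw [← ha]
            exact List.mem_cons_self
        exact List.mem_of_mem_drop (List.mem_of_mem_take hcw)
      · rw [List.eq_replicate_iff]
        refine ⟨?_, hmem⟩
        simp only [List.length_take, List.length_drop]
        omega
    · rw [if_neg hcond] at hne
      exact absurd rfl hne
  · rintro ⟨hpos, i, hir, c, hcrow, hc0, hrep⟩
    rw [List.mem_range] at hir
    refine ⟨(i : Int), ?_, ?_⟩
    · rw [PySem.List.mem_pyRange_one]
      simp only [PySem.List.len]
      constructor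
      · positivity
      · omega
    · rw [set_singleton_nonzero]
      rw [slice_neg_char row i k (by positivity) hk,
        if_pos (by constructor <;> omega)]
      rw [Int.toNat_natCast, hrep]
      refine ⟨c, hc0, ?_, fun x hx => List.eq_of_mem_replicate hx⟩
      simp only [ne_eq, List.replicate_eq_nil_iff]
      omega

-- A on a zero count: every window is empty
theorem A_zero (row : List Int) : array_connected row 0 = false := by
  unfold array_connected
  rw [List.any_eq_false]
  intro i hi
  rw [PySem.List.mem_pyRange_one] at hi
  have hsl : PySem.List.slice row (some i) (some (i + 0)) = [] := by
    apply List.eq_nil_of_length_eq_zero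
    rw [add_zero, PySem.List.length_slice]
    exact Nat.sub_self _
  simp only [hsl]
  intro hcon
  rw [set_singleton_nonzero] at hcon
  obtain ⟨c, _, hne, _⟩ := hcon
  exact hne rfl

-- ===== VERDICT (by name: the statement is the Claim_ definition above) =====
theorem array_connected_spec : Claim_unchanged_array_connected := by
  intro row k _ hpre hnd
  rcases lt_trichotomy k 0 with hk | hk | hk
  · -- negative count: A found no wrapped window (¬D_), B's counter never reaches k
    unfold array_connected_alt
    rw [altGo_nonpos k (by omega) row none 0 le_rfl]
    rw [← Bool.not_eq_true, A_neg_iff row k hk]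
    intro hcon
    exact hnd ⟨hk, hcon.1, hcon.2⟩
  · subst hk
    rw [A_zero]
    unfold array_connected_alt
    rw [altGo_nonpos 0 le_rfl row none 0 le_rfl]
  · rw [Bool.eq_iff_iff, A_true_iff row k (by omega) hpre, B_true_iff row k (by omega)]

theorem array_connected_changed : Claim_changed_array_connected := by
  unfold Claim_changed_array_connected; decide

theorem array_connected_tight : Claim_exact_array_connected := by
  intro row k _ _ hd
  obtain ⟨hk, hpos, hwin⟩ := hd
  rw [(A_neg_iff row k hk).mpr ⟨hpos, hwin⟩]
  unfold array_connected_alt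
  rw [altGo_nonpos k (by omega) row none 0 le_rfl]
  simp
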